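-- pv_equiv track=rewrite | github.com/Count-group/project1 | results/codes/算法竞赛/doubao/CF2071F_1.py | can_make_p_towering
-- ===== SOURCE A (Python) =====
-- def can_make_p_towering(arr, p, k):
--     n = len(arr)
--     for i in range(n):
--         removed = 0
--         valid = True
--         for j in range(n):
--             if arr[j] < p - abs(i - j):
--                 removed += 1
--                 if removed > k:
--                     valid = False
--                     break
--         if valid:
--             return True
--     return False
-- ===== SOURCE B (Python) =====
-- def can_make_p_towering(arr, p, k):
--     # O(n) difference-array sweep: element j violates peak i iff arr[j]+j-p+1 <= i <= p-arr[j]+j-1,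
--     # so each j contributes one interval of peaks; a negative removal budget allows no removals.
--     n = len(arr)
--     if k < 0:
--         k = 0
--     diff = [0] * (n + 1)
--     for j, v in enumerate(arr):
--         lo = v + j - p + 1
--         if lo < 0:
--             lo = 0
--         hi = p - (v - j) - 1
--         if hi > n - 1:
--             hi = n - 1
--         if lo <= hi:
--             diff[lo] += 1
--             diff[hi + 1] -= 1
--     bad = 0
--     for i in range(n):
--         bad += diff[i]
--         if bad <= k:
--             return True
--     return False
-- ===== Notes on version B (the rewrite author's own statement) =====
-- stated objective: alternative
-- what changed: Instead of re-scanning all elements for every candidate peak, B notes that element j violates exactly the contiguous interval of peaks arr[j]+j-p+1..p-arr[j]+j-1, accumulates these intervals in a difference array, and sweeps its prefix sums once.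
import Mathlib
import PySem

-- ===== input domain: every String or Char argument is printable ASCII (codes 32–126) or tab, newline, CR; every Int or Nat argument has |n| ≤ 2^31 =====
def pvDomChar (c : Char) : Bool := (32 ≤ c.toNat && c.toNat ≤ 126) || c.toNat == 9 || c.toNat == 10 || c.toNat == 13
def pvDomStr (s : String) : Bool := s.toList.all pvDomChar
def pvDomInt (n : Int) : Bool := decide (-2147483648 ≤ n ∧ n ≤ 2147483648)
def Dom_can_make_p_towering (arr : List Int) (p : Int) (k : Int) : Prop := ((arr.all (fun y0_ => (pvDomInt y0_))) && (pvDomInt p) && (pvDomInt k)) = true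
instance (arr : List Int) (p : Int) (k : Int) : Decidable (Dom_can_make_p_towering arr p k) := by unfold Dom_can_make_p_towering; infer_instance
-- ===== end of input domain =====

-- B replaces A's peak-by-peak rescans with one difference-array sweep: each element
-- contributes one contiguous interval of peak indices it violates.


-- ===== PORT A =====
-- inner 'for j in range(n)' loop with the 'removed' counter and early break
-- (arr[j] is ported with pyGetD: j is drawn from range(len(arr)), so always in range)
def pvInnerA (arr : List Int) (p k i : Int) : List Int → Int → Bool
  | [], _ => true
  | j :: js, removed =>
    if PySem.List.pyGetD arr j 0 < p - |i - j| then
      if removed + 1 > k then false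
      else pvInnerA arr p k i js (removed + 1)
    else pvInnerA arr p k i js removed

-- outer 'for i in range(n)' loop with early return True
def pvOuterA (arr : List Int) (p k : Int) : List Int → Bool
  | [] => false
  | i :: is =>
    if pvInnerA arr p k i (PySem.List.pyRange 0 (arr.length : Int)) 0 then true
    else pvOuterA arr p k is

def can_make_p_towering (arr : List Int) (p : Int) (k : Int) : Bool :=
  pvOuterA arr p k (PySem.List.pyRange 0 (arr.length : Int))

-- ===== PORT B =====
-- the clamped endpoints 'lo'/'hi' computed in Source B's loop body
def pvLo (p j v : Int) : Int :=
  let lo := v + j - p + 1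
  if lo < 0 then 0 else lo
def pvHi (p : Int) (n : Nat) (j v : Int) : Int :=
  let hi := p - (v - j) - 1
  if hi > (n : Int) - 1 then (n : Int) - 1 else hi

-- 'for j, v in enumerate(arr)': add each element's violated-peak interval to the difference array
def pvBuildDiff (p : Int) (n : Nat) : List (Int × Int) → List Int → List Int
  | [], diff => diff
  | (j, v) :: rest, diff =>
    if pvLo p j v ≤ pvHi p n j v then
      pvBuildDiff p n rest ((diff.modify (pvLo p j v).toNat (· + 1)).modify (pvHi p n j v + 1).toNat (· - 1))
    else pvBuildDiff p n rest diff

-- 'for i in range(n)': running prefix sum 'bad', early return True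
def pvScanB (k : Int) : List Int → Int → Bool
  | [], _ => false
  | d :: ds, bad =>
    if bad + d ≤ k then true
    else pvScanB k ds (bad + d)

def can_make_p_towering_alt (arr : List Int) (p : Int) (k : Int) : Bool :=
  let n := arr.length
  let k := if k < 0 then 0 else k
  let diff := pvBuildDiff p n (PySem.List.enumerate arr) (List.replicate (n + 1) 0)
  pvScanB k (diff.take n) 0

-- ===== PRECONDITION & SPEC =====
def Spec_can_make_p_towering (arr : List Int) (p : Int) (k : Int) (out : Bool) : Prop := out = can_make_p_towering_alt arr p k
instance (arr : List Int) (p : Int) (k : Int) (out : Bool) : Decidable (Spec_can_make_p_towering arr p k out) := by unfold Spec_can_make_p_towering; infer_instance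

-- ===== CLAIM (what is proved, stated in full; the proofs are below) =====
def Claim_equal_can_make_p_towering : Prop := ∀ (arr : List Int) (p : Int) (k : Int), Dom_can_make_p_towering arr p k → Spec_can_make_p_towering arr p k (can_make_p_towering arr p k)

-- ===== LEMMAS AND PROOFS =====

-- effective removal budget: A's break fires on 'removed > k', which a zero-violation pass never reaches,
-- so k behaves as max k 0 — exactly B's 'if k < 0: k = 0'
def pvK (k : Int) : Int := if k < 0 then 0 else k

-- number of elements violating peak i (what A's inner loop accumulates in 'removed')
def pvCnt (arr : List Int) (p i : Int) : Nat :=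
  (List.range arr.length).countP (fun j => decide (arr.getD j 0 < p - |i - (j : Int)|))

-- contribution of one element's two difference-array updates to the length-m prefix sum
def pvContrib (p : Int) (n : Nat) (m : Nat) (jv : Int × Int) : Int :=
  if pvLo p jv.1 jv.2 ≤ pvHi p n jv.1 jv.2 then
    (if (pvLo p jv.1 jv.2).toNat < m then 1 else 0) + (if (pvHi p n jv.1 jv.2 + 1).toNat < m then -1 else 0)
  else 0

theorem pvInnerA_eq (arr : List Int) (p k i : Int) :
    ∀ (js : List Int) (r : Int), 0 ≤ r → r ≤ pvK k →
    pvInnerA arr p k i js r =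
      decide (r + ((js.countP (fun j => decide (PySem.List.pyGetD arr j 0 < p - |i - j|)) : Nat) : Int) ≤ pvK k) := by
  intro js
  induction js with
  | nil =>
    intro r h0 hk
    simp [pvInnerA, List.countP]
    omega
  | cons j js ih =>
    intro r h0 hk
    by_cases hv : PySem.List.pyGetD arr j 0 < p - |i - j|
    · rw [pvInnerA, if_pos hv, List.countP_cons_of_pos (by simpa using hv)]
      by_cases hb : r + 1 > k
      · have : ¬ (r + ((js.countP (fun j => decide (PySem.List.pyGetD arr j 0 < p - |i - j|)) : Nat) : Int) + 1 ≤ pvK k) := by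
          unfold pvK at *; split_ifs at * <;> omega
        simp [hb]; omega
      · rw [if_neg hb, ih (r + 1) (by omega) (by unfold pvK at *; split_ifs at * <;> omega)]
        rw [decide_eq_decide]
        push_cast
        omega
    · rw [pvInnerA, if_neg hv, List.countP_cons_of_neg (by simpa using hv), ih r h0 hk]

theorem pvCnt_eq (arr : List Int) (p i : Int) :
    ((PySem.List.pyRange 0 (arr.length : Int)).countP
        (fun j => decide (PySem.List.pyGetD arr j 0 < p - |i - j|)) : Nat) = pvCnt arr p i := by
  rw [PySem.List.pyRange_zero_natCast, List.countP_map, pvCnt]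
  congr 1
  funext j
  simp [Function.comp, PySem.List.pyGetD_natCast]

theorem pvOuterA_iff (arr : List Int) (p k : Int) :
    ∀ (is : List Int), (pvOuterA arr p k is = true ↔
      ∃ i ∈ is, ((pvCnt arr p i : Nat) : Int) ≤ pvK k) := by
  intro is
  induction is with
  | nil => simp [pvOuterA]
  | cons i is ih =>
    rw [pvOuterA]
    have hk0 : (0:Int) ≤ pvK k := by unfold pvK; split_ifs <;> omega
    rw [pvInnerA_eq arr p k i _ 0 le_rfl hk0, pvCnt_eq]
    by_cases h : ((pvCnt arr p i : Nat) : Int) ≤ pvK k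
    · simp [h]
    · have : ¬ ((0:Int) + (pvCnt arr p i : Nat) ≤ pvK k) := by omega
      simp only [this, decide_false, if_neg (Bool.false_ne_true), ih]
      constructor
      · rintro ⟨x, hx, hle⟩; exact ⟨x, List.mem_cons_of_mem _ hx, hle⟩
      · rintro ⟨x, hx, hle⟩
        rcases List.mem_cons.mp hx with rfl | hx
        · exact absurd hle h
        · exact ⟨x, hx, hle⟩

theorem pvA_iff (arr : List Int) (p k : Int) :
    can_make_p_towering arr p k = true ↔
      ∃ i : Nat, i < arr.length ∧ ((pvCnt arr p i : Nat) : Int) ≤ pvK k := by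
  rw [can_make_p_towering, pvOuterA_iff]
  constructor
  · rintro ⟨x, hx, hle⟩
    rw [PySem.List.mem_pyRange_one] at hx
    refine ⟨x.toNat, by omega, ?_⟩
    have : ((x.toNat : Int)) = x := by omega
    rwa [this]
  · rintro ⟨i, hi, hle⟩
    exact ⟨(i : Int), PySem.List.mem_pyRange_one.mpr (by omega), hle⟩

theorem pvModify_take_sum (c : Int) (f : Int → Int) (hf : ∀ x, f x = x + c) :
    ∀ (l : List Int) (a m : Nat),
    ((l.modify a f).take m).sum = (l.take m).sum + (if a < m ∧ a < l.length then c else 0) := by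
  intro l
  induction l with
  | nil => intro a m; simp
  | cons x xs ih =>
    intro a m
    cases a with
    | zero =>
      cases m with
      | zero => simp
      | succ m =>
        have hmod : (x :: xs).modify 0 f = f x :: xs := rfl
        rw [hmod, List.take_succ_cons, List.take_succ_cons, List.sum_cons, List.sum_cons, hf x,
          if_pos (by simp)]
        ring
    | succ a =>
      cases m with
      | zero => simp
      | succ m =>
        have hmod : (x :: xs).modify (a + 1) f = x :: xs.modify a f := rfl
        rw [hmod, List.take_succ_cons, List.take_succ_cons, List.sum_cons, List.sum_cons, ih a m,
          List.length_cons]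
        have heq : (a + 1 < m + 1 ∧ a + 1 < xs.length + 1) ↔ (a < m ∧ a < xs.length) := by omega
        rw [if_congr heq rfl rfl]
        ring

theorem pvBuildDiff_length (p : Int) (n : Nat) :
    ∀ (pairs : List (Int × Int)) (diff : List Int),
    (pvBuildDiff p n pairs diff).length = diff.length := by
  intro pairs
  induction pairs with
  | nil => intro diff; rfl
  | cons jv rest ih =>
    intro diff
    obtain ⟨j, v⟩ := jv
    rw [pvBuildDiff]
    split_ifs <;> simp [ih]

theorem pvBuildDiff_take_sum (p : Int) (n : Nat) :
    ∀ (pairs : List (Int × Int)) (diff : List Int), diff.length = n + 1 → ∀ m : Nat, m ≤ n →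
    ((pvBuildDiff p n pairs diff).take m).sum = (diff.take m).sum + (pairs.map (pvContrib p n m)).sum := by
  intro pairs
  induction pairs with
  | nil => intro diff _ m _; simp [pvBuildDiff]
  | cons jv rest ih =>
    intro diff hlen m hm
    obtain ⟨j, v⟩ := jv
    rw [List.map_cons, List.sum_cons, pvBuildDiff]
    by_cases hg : pvLo p j v ≤ pvHi p n j v
    · rw [if_pos hg]
      have hlo0 : 0 ≤ pvLo p j v := by simp only [pvLo]; split_ifs <;> omega
      have hhin : pvHi p n j v ≤ (n : Int) - 1 := by simp only [pvHi]; split_ifs <;> omega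
      have hlen2 : ((diff.modify (pvLo p j v).toNat (· + 1)).modify (pvHi p n j v + 1).toNat (· - 1)).length = n + 1 := by
        simp [hlen]
      rw [ih _ hlen2 m hm,
        pvModify_take_sum (-1) (· - 1) (fun x => by ring) (diff.modify (pvLo p j v).toNat (· + 1)) ((pvHi p n j v + 1).toNat) m,
        pvModify_take_sum 1 (· + 1) (fun x => by ring) diff ((pvLo p j v).toNat) m]
      have hc : pvContrib p n m (j, v) =
          (if (pvLo p j v).toNat < m then 1 else 0) + (if (pvHi p n j v + 1).toNat < m then (-1:Int) else 0) := by
        rw [pvContrib, if_pos hg]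
      rw [hc]
      have h1 : ((pvLo p j v).toNat < m ∧ (pvLo p j v).toNat < diff.length) ↔ ((pvLo p j v).toNat < m) := by
        rw [hlen]; omega
      have h2 : ((pvHi p n j v + 1).toNat < m ∧ (pvHi p n j v + 1).toNat < (diff.modify (pvLo p j v).toNat (· + 1)).length) ↔ ((pvHi p n j v + 1).toNat < m) := by
        rw [List.length_modify, hlen]; omega
      rw [if_congr h1 rfl rfl, if_congr h2 rfl rfl]
      ring
    · rw [if_neg hg, ih _ hlen m hm, pvContrib, if_neg hg]
      ring

theorem pvContrib_eq (arr : List Int) (p : Int) (i j : Nat)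
    (hi : i < arr.length) (hj : j < arr.length) :
    pvContrib p arr.length (i + 1) ((j : Int), arr.getD j 0) =
      (if arr.getD j 0 < p - |(i : Int) - (j : Int)| then 1 else 0) := by
  rw [pvContrib]
  rcases abs_cases ((i : Int) - (j : Int)) with ⟨h1, h2⟩ | ⟨h1, h2⟩ <;>
    · rw [h1]
      simp only [pvLo, pvHi]
      split_ifs <;> omega

theorem pvScanB_iff (k : Int) :
    ∀ (ds : List Int) (bad : Int), (pvScanB k ds bad = true ↔
      ∃ m : Nat, m < ds.length ∧ bad + ((ds.take (m + 1)).sum) ≤ k) := by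
  intro ds
  induction ds with
  | nil => intro bad; simp [pvScanB]
  | cons d ds ih =>
    intro bad
    rw [pvScanB]
    by_cases h : bad + d ≤ k
    · simp only [if_pos h, true_iff]
      exact ⟨0, by simp, by simpa using h⟩
    · rw [if_neg h, ih (bad + d)]
      constructor
      · rintro ⟨m, hm, hle⟩
        exact ⟨m + 1, by simpa using Nat.succ_lt_succ hm, by
          rw [List.take_succ_cons, List.sum_cons]; omega⟩
      · rintro ⟨m, hm, hle⟩
        cases m with
        | zero => exfalso; simp at hle; omega
        | succ m =>
          refine ⟨m, by simpa using Nat.lt_of_succ_lt_succ hm, ?_⟩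
          rw [List.take_succ_cons, List.sum_cons] at hle; omega

theorem pvDiff_sum (arr : List Int) (p : Int) (i : Nat) (hi : i < arr.length) :
    ((pvBuildDiff p arr.length (PySem.List.enumerate arr) (List.replicate (arr.length + 1) 0)).take (i + 1)).sum
      = ((pvCnt arr p i : Nat) : Int) := by
  rw [pvBuildDiff_take_sum p arr.length _ _ (by simp) (i + 1) (by omega)]
  rw [PySem.List.enumerate_eq_map_pyRange arr 0, PySem.List.len_eq, PySem.List.pyRange_zero_natCast]
  rw [List.map_map, List.map_map]
  have hmc : ∀ j ∈ List.range arr.length,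
      ((pvContrib p arr.length (i + 1) ∘ (fun j => ((j:Int), PySem.List.pyGetD arr (j:Int) 0))) ∘ (fun k : Nat => (k : Int))) j
        = (fun j : Nat => if decide (arr.getD j 0 < p - |(i:Int) - (j:Int)|) = true then (1:Int) else 0) j := by
    intro j hj
    rw [List.mem_range] at hj
    simp only [Function.comp, PySem.List.pyGetD_natCast]
    rw [pvContrib_eq arr p i j hi hj]
    simp
  rw [List.map_congr_left hmc, PySem.List.sum_map_ite_one_zero]
  simp [pvCnt]

theorem pvB_iff (arr : List Int) (p k : Int) :
    can_make_p_towering_alt arr p k = true ↔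
      ∃ i : Nat, i < arr.length ∧ ((pvCnt arr p i : Nat) : Int) ≤ pvK k := by
  rw [can_make_p_towering_alt]
  have hdlen : (pvBuildDiff p arr.length (PySem.List.enumerate arr) (List.replicate (arr.length + 1) 0)).length
      = arr.length + 1 := by rw [pvBuildDiff_length]; simp
  rw [show (if k < 0 then (0:Int) else k) = pvK k from rfl, pvScanB_iff]
  constructor
  · rintro ⟨m, hm, hle⟩
    rw [List.length_take, hdlen] at hm
    have hm' : m < arr.length := by omega
    rw [List.take_take, min_eq_left (by omega), pvDiff_sum arr p m hm'] at hle
    exact ⟨m, hm', by omega⟩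
  · rintro ⟨i, hi, hle⟩
    refine ⟨i, by rw [List.length_take, hdlen]; omega, ?_⟩
    rw [List.take_take, min_eq_left (by omega), pvDiff_sum arr p i hi]
    omega

-- ===== VERDICT (by name: the statement is the Claim_ definition above) =====
theorem can_make_p_towering_spec : Claim_equal_can_make_p_towering := by
  intro arr p k _
  unfold Spec_can_make_p_towering
  rw [Bool.eq_iff_iff, pvA_iff, pvB_iff]
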